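-- pv_equiv track=rewrite | github.com/kcwww/Problem-Solving | 프로그래머스/lv2/17679. ［1차］ 프렌즈4블록/［1차］ 프렌즈4블록.py | delete_block
-- ===== SOURCE A (Python) =====
-- def delete_block(stack, board):
--     re = 0
--     move = [[0, 0],[0, -1], [-1, 0], [-1, -1]]
--     while stack:
--         i, j = stack.pop()
--         for mv in move:
--             r = i + mv[0]
--             c = j + mv[1]
--             if board[r][c] != 0:
--                 board[r][c] = 0
--                 re += 1
--     return re
-- ===== SOURCE B (Python) =====
-- def delete_block(stack, board):
--     # Phase 1: drain the stack, collecting every targeted coordinate into a set.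
--     coords = set()
--     move = [(0, 0), (0, -1), (-1, 0), (-1, -1)]
--     while stack:
--         i, j = stack.pop()
--         for dr, dc in move:
--             coords.add((i + dr, j + dc))
--     # Phase 2: one clearing pass over the collected coordinates.
--     count = 0
--     for r, c in coords:
--         if board[r][c] != 0:
--             board[r][c] = 0
--             count += 1
--     return count
-- ===== Notes on version B (the rewrite author's own statement) =====
-- stated objective: alternative
-- what changed: A interleaves visiting and clearing per popped block, relying on board mutation alone for dedup; B first drains the stack into an explicit set of target coordinates and then does a single separate clearing pass over that set.
import Mathlib
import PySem

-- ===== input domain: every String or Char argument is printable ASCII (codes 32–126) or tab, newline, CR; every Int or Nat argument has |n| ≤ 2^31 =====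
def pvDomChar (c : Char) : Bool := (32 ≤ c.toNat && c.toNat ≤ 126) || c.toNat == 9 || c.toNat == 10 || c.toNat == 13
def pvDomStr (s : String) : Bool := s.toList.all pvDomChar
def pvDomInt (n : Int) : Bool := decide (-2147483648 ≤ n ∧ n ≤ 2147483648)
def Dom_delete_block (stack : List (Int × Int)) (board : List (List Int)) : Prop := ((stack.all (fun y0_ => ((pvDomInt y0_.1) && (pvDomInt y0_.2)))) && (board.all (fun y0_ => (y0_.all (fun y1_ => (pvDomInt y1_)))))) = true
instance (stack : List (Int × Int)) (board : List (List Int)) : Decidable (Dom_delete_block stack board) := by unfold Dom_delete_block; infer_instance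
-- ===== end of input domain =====

-- B restructures A's single interleaved pop-and-clear loop into two phases: it first drains the
-- stack into an explicit set of target coordinates, then clears them in one separate pass.
-- Both Pythons mutate their arguments (drain `stack`, zero cells of `board`) identically where A
-- returns; the equivalence proved here is about the return value.

-- ===== PORT A =====
-- while stack: (i, j) = stack.pop(); for mv in move: … — pop takes the last element,
-- so the loop is structural recursion over stack.reverse, threading (board, re).
def delete_block_go : List (Int × Int) → List (List Int) → Int → Int
  | [], _, re => re
  | (i, j) :: rest, board, re =>
    let s := [((0:Int),(0:Int)), (0,-1), (-1,0), (-1,-1)].foldl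
      (fun (st : List (List Int) × Int) mv =>
        let r := i + mv.1
        let c := j + mv.2
        if PySem.List.pyGetD (PySem.List.pyGetD st.1 r []) c 0 ≠ 0 then
          (PySem.List.pySetD st.1 r (PySem.List.pySetD (PySem.List.pyGetD st.1 r []) c 0),
           st.2 + 1)
        else st)
      (board, re)
    delete_block_go rest s.1 s.2

def delete_block (stack : List (Int × Int)) (board : List (List Int)) : Int :=
  delete_block_go stack.reverse board 0

-- ===== PORT B =====
-- Phase 1 of Source B: while stack: (i, j) = stack.pop(); add the four target coordinates to the set.
def delete_block_alt_coords : List (Int × Int) → PySem.Set (Int × Int) → PySem.Set (Int × Int)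
  | [], s => s
  | (i, j) :: rest, s =>
    delete_block_alt_coords rest
      ([((0:Int),(0:Int)), (0,-1), (-1,0), (-1,-1)].foldl
        (fun s mv => PySem.Set.add s (i + mv.1, j + mv.2)) s)

-- Phase 2 of Source B: one clearing pass over the coordinate set, counting cells zeroed.
def delete_block_alt (stack : List (Int × Int)) (board : List (List Int)) : Int :=
  ((delete_block_alt_coords stack.reverse PySem.Set.empty).foldl
    (fun (st : List (List Int) × Int) rc =>
      if PySem.List.pyGetD (PySem.List.pyGetD st.1 rc.1 []) rc.2 0 ≠ 0 then
        (PySem.List.pySetD st.1 rc.1 (PySem.List.pySetD (PySem.List.pyGetD st.1 rc.1 []) rc.2 0),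
         st.2 + 1)
      else st)
    (board, 0)).2

-- ===== PRECONDITION & SPEC =====
-- Pre_ excludes exactly the inputs on which the Python A raises IndexError: some visited
-- coordinate (i+dr, j+dc) falls outside the board under Python's negative-index rule.
def Pre_delete_block (stack : List (Int × Int)) (board : List (List Int)) : Prop :=
  ∀ p ∈ stack, ∀ mv ∈ [((0:Int),(0:Int)), (0,-1), (-1,0), (-1,-1)],
    PySem.Raise.InRange board.length (p.1 + mv.1) ∧
    PySem.Raise.InRange (PySem.List.pyGetD board (p.1 + mv.1) []).length (p.2 + mv.2)
instance (stack : List (Int × Int)) (board : List (List Int)) : Decidable (Pre_delete_block stack board) := by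
  unfold Pre_delete_block PySem.Raise.InRange; infer_instance

def pvWitness_delete_block : (List (Int × Int)) × List (List Int) :=
  ([(1, 1)], [[1, 1], [1, 0]])

def Spec_delete_block (stack : List (Int × Int)) (board : List (List Int)) (out : Int) : Prop := out = delete_block_alt stack board
instance (stack : List (Int × Int)) (board : List (List Int)) (out : Int) : Decidable (Spec_delete_block stack board out) := by unfold Spec_delete_block; infer_instance

-- ===== CLAIM (what is proved, stated in full; the proofs are below) =====
def Claim_equal_delete_block : Prop := ∀ (stack : List (Int × Int)) (board : List (List Int)), Dom_delete_block stack board → Pre_delete_block stack board → Spec_delete_block stack board (delete_block stack board)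

-- ===== LEMMAS AND PROOFS =====

-- The clearing step both programs share: zero the cell at rc if nonzero, bumping the counter.
def pvStep (st : List (List Int) × Int) (rc : Int × Int) : List (List Int) × Int :=
  if PySem.List.pyGetD (PySem.List.pyGetD st.1 rc.1 []) rc.2 0 ≠ 0 then
    (PySem.List.pySetD st.1 rc.1 (PySem.List.pySetD (PySem.List.pyGetD st.1 rc.1 []) rc.2 0),
     st.2 + 1)
  else st

-- The four coordinates a popped block (i, j) targets.
def pvTargets (p : Int × Int) : List (Int × Int) :=
  [((0:Int),(0:Int)), (0,-1), (-1,0), (-1,-1)].map (fun mv => (p.1 + mv.1, p.2 + mv.2))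

-- The value the clearing step reads at a coordinate.
def pvCell (b : List (List Int)) (rc : Int × Int) : Int :=
  PySem.List.pyGetD (PySem.List.pyGetD b rc.1 []) rc.2 0

lemma pvIdx_some_lt {n : Nat} {i : Int} {k : Nat} (h : PySem.List.pyIdx? n i = some k) :
    k < n := by
  unfold PySem.List.pyIdx? at h
  split_ifs at h <;> simp_all <;> omega

-- Writing v at index i, a read at index m returns the old value, or returns v with
-- m aliasing i (so the old values at m and i coincide).
lemma pv_get_set {α : Type} (xs : List α) (i m : Int) (v d : α) :
    PySem.List.pyGetD (PySem.List.pySetD xs i v) m d = PySem.List.pyGetD xs m d ∨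
    (PySem.List.pyGetD (PySem.List.pySetD xs i v) m d = v ∧
     PySem.List.pyGetD xs m d = PySem.List.pyGetD xs i d) := by
  unfold PySem.List.pySetD PySem.List.pySet? PySem.List.pyGetD PySem.List.pyGet?
  cases hi : PySem.List.pyIdx? xs.length i with
  | none => simp
  | some k =>
    have hk := pvIdx_some_lt hi
    simp only [Option.map_some, Option.getD_some]
    rw [List.length_set]
    cases hm : PySem.List.pyIdx? xs.length m with
    | none => simp
    | some k' =>
      simp only [Option.bind_some] at *
      by_cases hkk : k = k'
      · subst hkk
        right
        rw [List.getElem?_set_self (by omega)]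
        simp
      · left
        rw [List.getElem?_set_ne hkk]

-- Reading back the written index returns v, provided the index resolves.
lemma pv_get_set_self {α : Type} (xs : List α) (i : Int) (v d : α)
    (h : (PySem.List.pyIdx? xs.length i).isSome) :
    PySem.List.pyGetD (PySem.List.pySetD xs i v) i d = v := by
  unfold PySem.List.pySetD PySem.List.pySet? PySem.List.pyGetD PySem.List.pyGet?
  cases hi : PySem.List.pyIdx? xs.length i with
  | none => rw [hi] at h; simp at h
  | some k =>
    have hk := pvIdx_some_lt hi
    simp only [Option.map_some, Option.getD_some]
    rw [List.length_set, hi]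
    simp only [Option.bind_some]
    rw [List.getElem?_set_self (by omega)]
    simp

lemma pv_getD_none {α : Type} (xs : List α) (i : Int) (d : α)
    (h : PySem.List.pyIdx? xs.length i = none) : PySem.List.pyGetD xs i d = d := by
  unfold PySem.List.pyGetD PySem.List.pyGet?
  rw [h]; rfl

-- A nonzero read forces both indices to resolve.
lemma pv_cell_ne_zero_resolves (b : List (List Int)) (rc : Int × Int) (h : pvCell b rc ≠ 0) :
    (PySem.List.pyIdx? b.length rc.1).isSome ∧
    (PySem.List.pyIdx? (PySem.List.pyGetD b rc.1 []).length rc.2).isSome := by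
  unfold pvCell at h
  refine ⟨?_, ?_⟩
  · cases hi : PySem.List.pyIdx? b.length rc.1 with
    | none =>
      rw [pv_getD_none _ _ _ hi] at h
      exact absurd (pv_getD_none ([] : List Int) rc.2 0
        (by unfold PySem.List.pyIdx?
            simp only [List.length_nil, Nat.cast_zero]
            split_ifs <;> first | rfl | omega)) h
    | some k => simp
  · cases hj : PySem.List.pyIdx? (PySem.List.pyGetD b rc.1 []).length rc.2 with
    | none => exact absurd (pv_getD_none _ _ _ hj) h
    | some k => simp

lemma pvStep_noop {st : List (List Int) × Int} {x : Int × Int} (h : pvCell st.1 x = 0) :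
    pvStep st x = st := by
  simp [pvStep, pvCell] at *
  intro hc; exact absurd h hc

-- After processing a coordinate its cell reads zero.
lemma pvStep_self_zero (st : List (List Int) × Int) (x : Int × Int) :
    pvCell (pvStep st x).1 x = 0 := by
  by_cases h : pvCell st.1 x = 0
  · rw [pvStep_noop h]; exact h
  · obtain ⟨h1, h2⟩ := pv_cell_ne_zero_resolves st.1 x h
    unfold pvStep
    rw [if_pos (by exact h)]
    unfold pvCell
    simp only
    rw [pv_get_set_self _ _ _ _ h1, pv_get_set_self _ _ _ _ h2]

-- The step only writes zeros, so a zero cell stays zero.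
lemma pvStep_preserve {st : List (List Int) × Int} {x : Int × Int} (y : Int × Int)
    (h : pvCell st.1 x = 0) : pvCell (pvStep st y).1 x = 0 := by
  unfold pvStep
  split_ifs with hy
  · unfold pvCell at *
    simp only
    rcases pv_get_set st.1 y.1 x.1
        (PySem.List.pySetD (PySem.List.pyGetD st.1 y.1 []) y.2 0) [] with h1 | ⟨h1, h1'⟩
    · rw [h1]; exact h
    · rw [h1]
      rcases pv_get_set (PySem.List.pyGetD st.1 y.1 []) y.2 x.2 0 0 with h2 | ⟨h2, _⟩
      · rw [h2, ← h1']; exact h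
      · exact h2
  · exact h

-- Once x's cell is zero, later occurrences of x in the fold are no-ops.
lemma pvFoldl_skip (x : Int × Int) :
    ∀ (L : List (Int × Int)) (st : List (List Int) × Int), pvCell st.1 x = 0 →
    L.foldl pvStep st = (L.filter (fun y => !(y == x))).foldl pvStep st
  | [], _, _ => rfl
  | y :: L, st, h => by
    by_cases hyx : y = x
    · subst hyx
      simp only [List.foldl_cons, List.filter_cons, BEq.rfl, Bool.not_true, pvStep_noop h]
      exact pvFoldl_skip y L st h
    · have hne : (!(y == x)) = true := by simp [hyx]
      simp only [List.foldl_cons, List.filter_cons, hne]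
      exact pvFoldl_skip x L (pvStep st y) (pvStep_preserve y h)

-- The clearing fold is unchanged by dropping literal duplicate coordinates.
lemma pvFoldl_dedup :
    ∀ (L : List (Int × Int)) (st : List (List Int) × Int),
    L.foldl pvStep st = (PySem.Set.ofList L).foldl pvStep st
  | [], _ => rfl
  | x :: L, st => by
    rw [PySem.Set.ofList_cons]
    simp only [List.foldl_cons]
    rw [pvFoldl_dedup L (pvStep st x)]
    rw [pvFoldl_skip x (PySem.Set.ofList L) (pvStep st x) (pvStep_self_zero st x)]
    rfl

-- A's loop is the clearing fold over the concatenated target coordinates.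
lemma pvA_eq : ∀ (L : List (Int × Int)) (b : List (List Int)) (re : Int),
    delete_block_go L b re = ((L.flatMap pvTargets).foldl pvStep (b, re)).2
  | [], _, _ => rfl
  | (i, j) :: rest, b, re => by
    show delete_block_go rest _ _ = _
    rw [pvA_eq rest]
    rw [List.flatMap_cons, List.foldl_append]
    congr 1

-- B's first phase collects exactly those coordinates into the set.
lemma pvB_coords : ∀ (L : List (Int × Int)) (s : PySem.Set (Int × Int)),
    delete_block_alt_coords L s = (L.flatMap pvTargets).foldl PySem.Set.add s
  | [], _ => rfl
  | (i, j) :: rest, s => by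
    show delete_block_alt_coords rest _ = _
    rw [pvB_coords rest]
    rw [List.flatMap_cons, List.foldl_append]
    congr 1

-- ===== VERDICT (by name: the statement is the Claim_ definition above) =====
theorem delete_block_spec : Claim_equal_delete_block := by
  intro stack board _ _
  unfold Spec_delete_block delete_block delete_block_alt
  rw [pvA_eq, pvB_coords]
  exact congrArg Prod.snd (pvFoldl_dedup _ (board, 0))
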